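-- pv_equiv track=rewrite | github.com/N3pomuceno/si_progI_exercicios | 2305.py | calculoDeImg
-- ===== SOURCE A (Python) =====
-- def calculoDeImg(plant, lin, col):
--     imagemIntegral = [None]*(lin+1)
--     for ind in range(lin+1):
--         imagemIntegral[ind] = [0]*(col+1)
--
--     for ind in range(1, lin+1):
--         for jnd in range(1, col+1):
--             imagemIntegral[ind][jnd] = imagemIntegral[ind-1][jnd] + imagemIntegral[ind][jnd-1] + plant[ind-1][jnd-1] - imagemIntegral[ind-1][jnd-1]
--
--     return imagemIntegral
-- ===== SOURCE B (Python) =====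
-- def calculoDeImg(plant, lin, col):
--     # Row-streaming construction: no (lin+1)x(col+1) table is preallocated and no
--     # 4-term inclusion-exclusion recurrence is used.  Each output row is built from
--     # the previous row alone: a running horizontal sum of the plant row added to the
--     # entry directly above.  Rows are appended to the output one by one.
--     out = []
--     prev = []
--     for i in range(lin + 1):
--         cur = [0] * (col + 1)
--         if i > 0:
--             s = 0
--             for j in range(1, col + 1):
--                 s += plant[i - 1][j - 1]
--                 cur[j] = s + prev[j]
--         out.append(cur)
--         prev = cur
--     return out
-- ===== Notes on version B (the rewrite author's own statement) =====
-- stated objective: alternative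
-- what changed: Instead of preallocating a (lin+1)x(col+1) table and filling it in place with the fused 4-term inclusion-exclusion recurrence, B streams the rows: each output row is built from the previous row alone as a running horizontal sum of the plant row added to the entry above, and rows are appended one by one.
import Mathlib
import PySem

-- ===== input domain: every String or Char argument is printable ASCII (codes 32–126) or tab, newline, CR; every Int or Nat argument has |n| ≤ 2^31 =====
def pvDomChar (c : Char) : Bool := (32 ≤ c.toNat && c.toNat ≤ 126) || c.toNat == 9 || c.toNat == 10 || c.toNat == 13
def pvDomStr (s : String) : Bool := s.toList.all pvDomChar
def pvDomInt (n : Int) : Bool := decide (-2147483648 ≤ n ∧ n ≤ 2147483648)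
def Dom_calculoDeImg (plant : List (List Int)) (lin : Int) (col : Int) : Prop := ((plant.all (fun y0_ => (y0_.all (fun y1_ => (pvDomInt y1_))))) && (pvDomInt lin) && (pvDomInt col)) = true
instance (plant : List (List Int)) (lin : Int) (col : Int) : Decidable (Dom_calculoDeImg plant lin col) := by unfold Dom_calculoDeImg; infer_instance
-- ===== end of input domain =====

-- B streams the rows functionally (each output row = horizontal prefix sum of the plant row
-- added to the previous output row, appended one by one) instead of A's in-place mutation of
-- a preallocated table with the fused 4-term inclusion-exclusion recurrence.


-- ===== PORT A =====
-- m[i][j] as an Int read; the 0/[] defaults stand where Python would raise IndexError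
-- (those inputs are excluded by Pre_calculoDeImg, so both ports are exact on the claimed domain).
def pvMatGet (m : List (List Int)) (i j : Int) : Int :=
  PySem.List.pyGetD (PySem.List.pyGetD m i []) j 0

-- m[i][j] = v (the indices here are the loop variables, always ≥ 1)
def pvMatSet (m : List (List Int)) (i j : Nat) (v : Int) : List (List Int) :=
  m.set i ((m.getD i []).set j v)

def calculoDeImg (plant : List (List Int)) (lin : Int) (col : Int) : List (List Int) :=
  (PySem.List.pyRange 1 (lin+1) 1).foldl (fun m ind =>
    (PySem.List.pyRange 1 (col+1) 1).foldl (fun m jnd =>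
      pvMatSet m ind.toNat jnd.toNat
        (pvMatGet m (ind-1) jnd + pvMatGet m ind (jnd-1)
          + pvMatGet plant (ind-1) (jnd-1) - pvMatGet m (ind-1) (jnd-1))) m)
    ((PySem.List.pyRange 0 (lin+1) 1).map (fun _ => List.replicate (col+1).toNat (0:Int)))

-- ===== PORT B =====
-- inner loop of B: running sum s over the plant row, writing s + prev[j] into a fresh
-- zero row (state (s, cur)); Python's 's += plant[i-1][j-1]; cur[j] = s + prev[j]'
def pvBRow (plant : List (List Int)) (prev : List Int) (i col : Int) : List Int :=
  ((PySem.List.pyRange 1 (col+1) 1).foldl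
    (fun acc j =>
      (acc.1 + pvMatGet plant (i-1) (j-1),
       acc.2.set j.toNat (acc.1 + pvMatGet plant (i-1) (j-1) + PySem.List.pyGetD prev j 0)))
    (0, List.replicate (col+1).toNat (0:Int))).2

-- outer loop body: state (prev, out); row 0 is the base zero row, later rows are streamed
-- from the previous one; 'out.append(cur); prev = cur'
def pvBStep (plant : List (List Int)) (col : Int) :
    List Int × List (List Int) → Int → List Int × List (List Int) :=
  fun st i =>
    if 0 < i then (pvBRow plant st.1 i col, st.2 ++ [pvBRow plant st.1 i col])
    else (List.replicate (col+1).toNat (0:Int),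
          st.2 ++ [List.replicate (col+1).toNat (0:Int)])

def calculoDeImg_alt (plant : List (List Int)) (lin : Int) (col : Int) : List (List Int) :=
  ((PySem.List.pyRange 0 (lin+1) 1).foldl (pvBStep plant col) ([], [])).2

-- ===== PRECONDITION & SPEC =====
-- Pre_ excludes exactly the inputs where Python A raises IndexError: when both loops run
-- (1 ≤ lin and 1 ≤ col), plant must have at least lin rows and its first lin rows at least
-- col entries each.
def Pre_calculoDeImg (plant : List (List Int)) (lin : Int) (col : Int) : Prop :=
  (1 ≤ lin ∧ 1 ≤ col) →
    (lin ≤ (plant.length : Int) ∧ ∀ r ∈ plant.take lin.toNat, col ≤ (r.length : Int))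
instance (plant : List (List Int)) (lin : Int) (col : Int) : Decidable (Pre_calculoDeImg plant lin col) := by
  unfold Pre_calculoDeImg; infer_instance

def pvWitness_calculoDeImg : List (List Int) × Int × Int := ([[1, 2], [3, 4]], 2, 2)

def Spec_calculoDeImg (plant : List (List Int)) (lin : Int) (col : Int) (out : List (List Int)) : Prop :=
  out = calculoDeImg_alt plant lin col
instance (plant : List (List Int)) (lin : Int) (col : Int) (out : List (List Int)) : Decidable (Spec_calculoDeImg plant lin col out) := by
  unfold Spec_calculoDeImg; infer_instance

-- ===== CLAIM (what is proved, stated in full; the proofs are below) =====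
def Claim_equal_calculoDeImg : Prop := ∀ (plant : List (List Int)) (lin : Int) (col : Int), Dom_calculoDeImg plant lin col → Pre_calculoDeImg plant lin col → Spec_calculoDeImg plant lin col (calculoDeImg plant lin col)

-- ===== LEMMAS AND PROOFS =====

-- ---- A-side characterization ----

-- the shape of A's outer loop: process rows 1..b-1; the new value of cell (i, j) is
-- f i (row i-1) (current row i) j.
def pvOuter (f : Int → List Int → List Int → Int → Int) (col : Int) (b : Int)
    (m0 : List (List Int)) : List (List Int) :=
  (PySem.List.pyRange 1 b 1).foldl (fun m i =>
    (PySem.List.pyRange 1 (col+1) 1).foldl (fun m j =>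
      pvMatSet m i.toNat j.toNat
        (f i (PySem.List.pyGetD m (i-1) []) (PySem.List.pyGetD m i []) j)) m) m0

-- A's fused recurrence as a cell function
def pvFA (plant : List (List Int)) : Int → List Int → List Int → Int → Int :=
  fun i p r j => PySem.List.pyGetD p j 0 + PySem.List.pyGetD r (j-1) 0
    + pvMatGet plant (i-1) (j-1) - PySem.List.pyGetD p (j-1) 0

-- one inner (row) loop of A, as a pure row computation
def pvInner (f : Int → List Int → List Int → Int → Int) (col : Int) (i : Int)
    (p r0 : List Int) : List Int :=
  (PySem.List.pyRange 1 (col+1) 1).foldl (fun r j => r.set j.toNat (f i p r j)) r0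

-- row k of A's finished matrix
def pvFinals (f : Int → List Int → List Int → Int → Int) (col : Int)
    (row0 : Nat → List Int) : Nat → List Int
  | 0 => row0 0
  | (k+1) => pvInner f col ((k:Int)+1) (pvFinals f col row0 k) (row0 (k+1))

-- per-index recurrence along one row
def pvTgt (φ : Int → Int → Int) : Nat → Int
  | 0 => 0
  | (k+1) => φ (pvTgt φ k) ((k:Int)+1)

-- ---- B-side characterization ----

-- prefix sums of a plant row
def pvPref (row : List Int) : Nat → Int
  | 0 => 0
  | (t+1) => pvPref row t + PySem.List.pyGetD row (t:Int) 0

-- B's finished rows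
def pvBRowsN (plant : List (List Int)) (col : Int) : Nat → List Int
  | 0 => List.replicate (col+1).toNat 0
  | (k+1) => pvBRow plant (pvBRowsN plant col k) ((k:Int)+1) col

-- ---- generic getD/set lemmas ----

lemma pv_getD_map_range {α : Type} (g : Nat → α) (d : α) {L k : Nat} (hk : k < L) :
    ((List.range L).map g).getD k d = g k := by
  rw [List.getD_eq_getElem _ _ (by simpa using hk)]
  simp

lemma pv_pyGetD_map_range {α : Type} (g : Nat → α) (d : α) {L : Nat} {i : Int}
    (h0 : 0 ≤ i) (hk : i.toNat < L) :
    PySem.List.pyGetD ((List.range L).map g) i d = g i.toNat := by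
  rw [PySem.List.pyGetD_of_nonneg _ _ h0, pv_getD_map_range g d hk]

lemma pv_set_map_range {α : Type} (g : Nat → α) {L k : Nat} (v : α) (_hk : k < L) :
    ((List.range L).map g).set k v
      = (List.range L).map (fun t => if t = k then v else g t) := by
  apply List.ext_getElem (by simp)
  intro n h1 h2
  simp only [List.getElem_set, List.getElem_map, List.getElem_range]
  split_ifs with h h' h'
  · rfl
  · omega
  · omega
  · rfl

lemma pv_pyGetD_set_ne {α : Type} (m : List α) (k : Nat) (r : α) (i : Int) (d : α)
    (h0 : 0 ≤ i) (hne : i.toNat ≠ k) :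
    PySem.List.pyGetD (m.set k r) i d = PySem.List.pyGetD m i d := by
  rw [PySem.List.pyGetD_of_nonneg _ _ h0, PySem.List.pyGetD_of_nonneg _ _ h0,
    List.getD_eq_getElem?_getD, List.getD_eq_getElem?_getD,
    List.getElem?_set_ne (Ne.symm hne)]

lemma pv_pyGetD_set_self {α : Type} (m : List α) (k : Nat) (r : α) (i : Int) (d : α)
    (h0 : 0 ≤ i) (heq : i.toNat = k) (hlt : k < m.length) :
    PySem.List.pyGetD (m.set k r) i d = r := by
  rw [PySem.List.pyGetD_of_nonneg _ _ h0, List.getD_eq_getElem?_getD, heq,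
    List.getElem?_set_self hlt]
  rfl

lemma pv_replicate_eq_map_range {α : Type} (c : Nat) (v : α) :
    List.replicate c v = (List.range c).map (fun _ => v) := by
  apply List.ext_getElem (by simp)
  intro n h1 h2
  simp

-- ---- A's loops in closed form ----

-- the inner loop only touches row i, so it is row computation pvInner applied to that row
lemma pvInner_mat (f : Int → List Int → List Int → Int → Int) (i : Int) (hi : 1 ≤ i)
    (m : List (List Int)) (hlen : i.toNat < m.length) (js : List Int) (r : List Int) :
    js.foldl (fun m j => pvMatSet m i.toNat j.toNat
        (f i (PySem.List.pyGetD m (i-1) []) (PySem.List.pyGetD m i []) j)) (m.set i.toNat r)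
    = m.set i.toNat (js.foldl (fun r j => r.set j.toNat
        (f i (PySem.List.pyGetD m (i-1) []) r j)) r) := by
  induction js generalizing r with
  | nil => rfl
  | cons j rest ih =>
    simp only [List.foldl_cons]
    have e1 : PySem.List.pyGetD (m.set i.toNat r) (i-1) [] = PySem.List.pyGetD m (i-1) [] :=
      pv_pyGetD_set_ne m i.toNat r (i-1) [] (by omega) (by omega)
    have e2 : PySem.List.pyGetD (m.set i.toNat r) i [] = r :=
      pv_pyGetD_set_self m i.toNat r i [] (by omega) rfl hlen
    have e3 : pvMatSet (m.set i.toNat r) i.toNat j.toNat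
        (f i (PySem.List.pyGetD (m.set i.toNat r) (i-1) [])
          (PySem.List.pyGetD (m.set i.toNat r) i []) j)
        = m.set i.toNat (r.set j.toNat (f i (PySem.List.pyGetD m (i-1) []) r j)) := by
      unfold pvMatSet
      rw [e1, e2, List.set_set]
      congr 1
      rw [List.getD_eq_getElem?_getD, List.getElem?_set_self hlen]
      rfl
    rw [e3, ih]

lemma pvInner_apply (f : Int → List Int → List Int → Int → Int) (col : Int) (i : Int)
    (hi : 1 ≤ i) (m : List (List Int)) (hlen : i.toNat < m.length) :
    (PySem.List.pyRange 1 (col+1) 1).foldl (fun m j => pvMatSet m i.toNat j.toNat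
        (f i (PySem.List.pyGetD m (i-1) []) (PySem.List.pyGetD m i []) j)) m
    = m.set i.toNat (pvInner f col i (PySem.List.pyGetD m (i-1) []) (m.getD i.toNat [])) := by
  have hm : m = m.set i.toNat (m.getD i.toNat []) := by
    rw [List.getD_eq_getElem _ _ hlen, List.set_getElem_self]
  conv_lhs => rw [hm]
  rw [pvInner_mat f i hi m hlen]
  rfl

-- state of A's matrix after the outer loop has processed rows 1..n
lemma pvOuter_charac (f : Int → List Int → List Int → Int → Int) (col : Int)
    (row0 : Nat → List Int) (L n : Nat) (hn : n < L) :
    pvOuter f col ((n:Int)+1) ((List.range L).map row0)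
    = (List.range L).map (fun k => if k ≤ n then pvFinals f col row0 k else row0 k) := by
  induction n with
  | zero =>
    have h0 : PySem.List.pyRange 1 (((0:Nat):Int)+1) 1 = [] :=
      PySem.List.pyRange_one_eq_nil (by norm_num)
    unfold pvOuter
    rw [h0]
    simp only [List.foldl_nil]
    apply List.map_congr_left
    intro k _
    rcases Nat.eq_zero_or_pos k with h | h
    · subst h; simp [pvFinals]
    · rw [if_neg (by omega)]
  | succ n ih =>
    have hn' : n < L := by omega
    unfold pvOuter
    have hr : PySem.List.pyRange 1 (((n+1:Nat):Int)+1) 1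
        = PySem.List.pyRange 1 ((n:Int)+1) 1 ++ [(n:Int)+1] := by
      push_cast
      exact PySem.List.pyRange_one_succ_right (by omega)
    rw [hr, List.foldl_append]
    have ihu : (PySem.List.pyRange 1 ((n:Int)+1) 1).foldl _ _ = _ := ih hn'
    unfold pvOuter at ihu
    rw [ihu]
    set M := (List.range L).map (fun k => if k ≤ n then pvFinals f col row0 k else row0 k) with hM
    simp only [List.foldl_cons, List.foldl_nil]
    have hlen : ((n:Int)+1).toNat < M.length := by
      rw [hM]; simp; omega
    rw [pvInner_apply f col ((n:Int)+1) (by omega) M hlen]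
    have hp : PySem.List.pyGetD M (((n:Int)+1)-1) [] = pvFinals f col row0 n := by
      rw [hM]
      have : ((n:Int)+1)-1 = ((n:Nat):Int) := by omega
      rw [this, pv_pyGetD_map_range _ _ (by omega) (by simpa using hn')]
      simp
    have hr0 : M.getD ((n:Int)+1).toNat [] = row0 (n+1) := by
      rw [hM]
      have : ((n:Int)+1).toNat = n+1 := by omega
      rw [this, pv_getD_map_range _ _ hn]
      rw [if_neg (by omega)]
    rw [hp, hr0]
    have htn : ((n:Int)+1).toNat = n+1 := by omega
    rw [htn, hM, pv_set_map_range _ _ hn]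
    apply List.map_congr_left
    intro k _
    by_cases h1 : k = n+1
    · subst h1
      rw [if_pos rfl, if_pos (by omega)]
      simp [pvFinals]
    · rw [if_neg h1]
      by_cases h2 : k ≤ n
      · rw [if_pos h2, if_pos (by omega)]
      · rw [if_neg h2, if_neg (by omega)]

-- a row scan whose value at j reads entry j-1 (A's row recurrence)
lemma pvScan_charac (φ : Int → Int → Int) (c m : Nat) (hm : m < c) :
    (PySem.List.pyRange 1 ((m:Int)+1) 1).foldl
        (fun r j => r.set j.toNat (φ (PySem.List.pyGetD r (j-1) 0) j)) (List.replicate c 0)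
    = (List.range c).map (fun k => if k ≤ m then pvTgt φ k else 0) := by
  induction m with
  | zero =>
    have h0 : PySem.List.pyRange 1 (((0:Nat):Int)+1) 1 = [] :=
      PySem.List.pyRange_one_eq_nil (by norm_num)
    rw [h0, List.foldl_nil]
    apply List.ext_getElem (by simp)
    intro k h1 h2
    simp only [List.getElem_replicate, List.getElem_map, List.getElem_range]
    rcases Nat.eq_zero_or_pos k with h | h
    · subst h; simp [pvTgt]
    · rw [if_neg (by omega)]
  | succ m ih =>
    have hm' : m < c := by omega
    have hr : PySem.List.pyRange 1 (((m+1:Nat):Int)+1) 1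
        = PySem.List.pyRange 1 ((m:Int)+1) 1 ++ [(m:Int)+1] := by
      push_cast
      exact PySem.List.pyRange_one_succ_right (by omega)
    rw [hr, List.foldl_append, ih hm', List.foldl_cons, List.foldl_nil]
    have hprev : PySem.List.pyGetD ((List.range c).map
        (fun k => if k ≤ m then pvTgt φ k else 0)) (((m:Int)+1)-1) 0 = pvTgt φ m := by
      have : ((m:Int)+1)-1 = ((m:Nat):Int) := by omega
      rw [this, pv_pyGetD_map_range _ _ (by omega) (by simpa using hm')]
      simp
    rw [hprev]
    have htn : ((m:Int)+1).toNat = m+1 := by omega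
    rw [htn, pv_set_map_range _ _ hm]
    apply List.map_congr_left
    intro k _
    by_cases h1 : k = m+1
    · subst h1
      rw [if_pos rfl, if_pos (by omega)]
      simp [pvTgt]
    · rw [if_neg h1]
      by_cases h2 : k ≤ m
      · rw [if_pos h2, if_pos (by omega)]
      · rw [if_neg h2, if_neg (by omega)]

-- ---- B's loops in closed form ----

-- B's inner loop, run up to j = u: the running sum is the prefix sum, and the row
-- holds prefix-sum-plus-above on the already written entries
lemma pvBRowAux (q prev : List Int) (m u : Nat) (hu : u ≤ m) :
    (PySem.List.pyRange 1 ((u:Int)+1) 1).foldl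
      (fun acc j =>
        (acc.1 + PySem.List.pyGetD q (j-1) 0,
         acc.2.set j.toNat (acc.1 + PySem.List.pyGetD q (j-1) 0 + PySem.List.pyGetD prev j 0)))
      (0, List.replicate (m+1) 0)
    = (pvPref q u, (List.range (m+1)).map
        (fun t => if 1 ≤ t ∧ t ≤ u then pvPref q t + PySem.List.pyGetD prev (t:Int) 0 else 0)) := by
  induction u with
  | zero =>
    have h0 : PySem.List.pyRange 1 (((0:Nat):Int)+1) 1 = [] :=
      PySem.List.pyRange_one_eq_nil (by norm_num)
    rw [h0, List.foldl_nil]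
    simp only [Prod.mk.injEq]
    refine ⟨rfl, ?_⟩
    rw [pv_replicate_eq_map_range]
    apply List.map_congr_left
    intro k _
    rw [if_neg (by omega)]
  | succ u ih =>
    have hu' : u ≤ m := by omega
    have hr : PySem.List.pyRange 1 (((u+1:Nat):Int)+1) 1
        = PySem.List.pyRange 1 ((u:Int)+1) 1 ++ [(u:Int)+1] := by
      push_cast
      exact PySem.List.pyRange_one_succ_right (by omega)
    rw [hr, List.foldl_append, ih hu', List.foldl_cons, List.foldl_nil]
    simp only [Prod.mk.injEq]
    have hq : ((u:Int)+1)-1 = ((u:Nat):Int) := by omega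
    constructor
    · show pvPref q u + PySem.List.pyGetD q (((u:Int)+1)-1) 0 = pvPref q (u+1)
      rw [hq]
      rfl
    · have htn : ((u:Int)+1).toNat = u+1 := by omega
      rw [hq, htn, pv_set_map_range _ _ (by omega : u+1 < m+1)]
      apply List.map_congr_left
      intro k _
      by_cases h1 : k = u+1
      · subst h1
        rw [if_pos rfl, if_pos (by omega)]
        push_cast
        rfl
      · rw [if_neg h1]
        by_cases h2 : 1 ≤ k ∧ k ≤ u
        · rw [if_pos h2, if_pos (by omega)]
        · rw [if_neg h2, if_neg (by omega)]

-- a finished streamed row, for nonnegative col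
lemma pvBRow_charac (plant : List (List Int)) (prev : List Int) (i : Int) (m : Nat) :
    pvBRow plant prev i (m:Int)
    = (List.range (m+1)).map
        (fun t => if 1 ≤ t ∧ t ≤ m then
          pvPref (PySem.List.pyGetD plant (i-1) []) t + PySem.List.pyGetD prev (t:Int) 0
          else 0) := by
  have hm1 : (((m:Nat):Int)+1).toNat = m+1 := by omega
  show ((PySem.List.pyRange 1 ((m:Int)+1) 1).foldl
      (fun acc j =>
        (acc.1 + PySem.List.pyGetD (PySem.List.pyGetD plant (i-1) []) (j-1) 0,
         acc.2.set j.toNat (acc.1 + PySem.List.pyGetD (PySem.List.pyGetD plant (i-1) []) (j-1) 0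
           + PySem.List.pyGetD prev j 0)))
      (0, List.replicate ((m:Int)+1).toNat (0:Int))).2 = _
  rw [hm1, pvBRowAux (PySem.List.pyGetD plant (i-1) []) prev m m le_rfl]

-- every streamed row, and the base row, start with 0
lemma pvBRowsN_head (plant : List (List Int)) (col : Int) (k : Nat) :
    PySem.List.pyGetD (pvBRowsN plant col k) 0 0 = 0 := by
  cases k with
  | zero =>
    show PySem.List.pyGetD (List.replicate (col+1).toNat (0:Int)) 0 0 = 0
    rw [PySem.List.pyGetD_of_nonneg _ _ (by omega)]
    cases h : (col+1).toNat <;> simp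
  | succ k =>
    show PySem.List.pyGetD (pvBRow plant (pvBRowsN plant col k) ((k:Int)+1) col) 0 0 = 0
    rcases lt_or_ge col 0 with hc | hc
    · have h1 : PySem.List.pyRange 1 (col+1) 1 = [] :=
        PySem.List.pyRange_one_eq_nil (by omega)
      unfold pvBRow
      rw [h1, List.foldl_nil]
      rw [PySem.List.pyGetD_of_nonneg _ _ (by omega)]
      cases h : (col+1).toNat <;> simp
    · obtain ⟨m, rfl⟩ : ∃ m : Nat, col = (m:Int) := ⟨col.toNat, by omega⟩
      rw [pvBRow_charac, pv_pyGetD_map_range _ _ (by omega) (by omega)]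
      rw [if_neg (by omega)]

-- state after B's outer loop has processed indices 0..n
lemma pvBOuter_charac (plant : List (List Int)) (col : Int) (n : Nat) :
    (PySem.List.pyRange 0 ((n:Int)+1) 1).foldl (pvBStep plant col) ([], [])
    = (pvBRowsN plant col n, (List.range (n+1)).map (pvBRowsN plant col)) := by
  induction n with
  | zero =>
    have h0 : PySem.List.pyRange 0 (((0:Nat):Int)+1) 1 = [(0:Int)] :=
      PySem.List.pyRange_one_singleton 0
    rw [h0, List.foldl_cons, List.foldl_nil]
    show pvBStep plant col _ 0 = _
    unfold pvBStep
    rw [if_neg (by omega)]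
    simp [pvBRowsN]
  | succ n ih =>
    have hr : PySem.List.pyRange 0 (((n+1:Nat):Int)+1) 1
        = PySem.List.pyRange 0 ((n:Int)+1) 1 ++ [(n:Int)+1] := by
      push_cast
      exact PySem.List.pyRange_one_succ_right (by omega)
    rw [hr, List.foldl_append, ih, List.foldl_cons, List.foldl_nil]
    show pvBStep plant col _ ((n:Int)+1) = _
    unfold pvBStep
    rw [if_pos (by omega)]
    simp only [Prod.mk.injEq]
    refine ⟨rfl, ?_⟩
    conv_rhs => rw [List.range_succ]
    rw [List.map_append]
    rfl

-- ---- the two row recurrences agree ----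

-- A's recurrence telescopes: A's cell minus the cell above is the horizontal prefix sum
lemma pvTgt_equiv (p q : List Int) (hp0 : PySem.List.pyGetD p 0 0 = 0) (k : Nat) :
    pvTgt (fun v j => PySem.List.pyGetD p j 0 + v + PySem.List.pyGetD q (j-1) 0
        - PySem.List.pyGetD p (j-1) 0) k
    = pvTgt (fun v j => v + PySem.List.pyGetD q (j-1) 0) k + PySem.List.pyGetD p (k:Int) 0 := by
  induction k with
  | zero => simpa [pvTgt] using hp0.symm
  | succ k ih =>
    simp only [pvTgt, ih]
    push_cast
    simp only [add_sub_cancel_right]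
    ring

-- the second recurrence IS the prefix sum
lemma pvTgt_pref (q : List Int) (k : Nat) :
    pvTgt (fun v j => v + PySem.List.pyGetD q (j-1) 0) k = pvPref q k := by
  induction k with
  | zero => rfl
  | succ k ih =>
    simp only [pvTgt, pvPref, ih]
    have : ((k:Int)+1)-1 = (k:Int) := by omega
    rw [this]

-- one finished row of A equals B's streamed row built from the same previous row
lemma pvRow_eq (plant : List (List Int)) (col : Int) (i : Int) (p : List Int)
    (hp0 : PySem.List.pyGetD p 0 0 = 0) :
    pvInner (pvFA plant) col i p (List.replicate (col+1).toNat 0)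
    = pvBRow plant p i col := by
  rcases lt_or_ge col 0 with hc | hc
  · have h1 : PySem.List.pyRange 1 (col+1) 1 = [] :=
      PySem.List.pyRange_one_eq_nil (by omega)
    unfold pvInner pvBRow
    rw [h1]
    simp only [List.foldl_nil]
  · obtain ⟨m, rfl⟩ : ∃ m : Nat, col = (m:Int) := ⟨col.toNat, by omega⟩
    have hm1 : (((m:Nat):Int)+1).toNat = m+1 := by omega
    have hA : pvInner (pvFA plant) (m:Int) i p (List.replicate (m+1) 0)
        = (List.range (m+1)).map (fun k =>
            if k ≤ m then pvTgt (fun v j => PySem.List.pyGetD p j 0 + v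
              + PySem.List.pyGetD (PySem.List.pyGetD plant (i-1) []) (j-1) 0
              - PySem.List.pyGetD p (j-1) 0) k else 0) :=
      pvScan_charac (fun v j => PySem.List.pyGetD p j 0 + v
        + PySem.List.pyGetD (PySem.List.pyGetD plant (i-1) []) (j-1) 0
        - PySem.List.pyGetD p (j-1) 0) (m+1) m (by omega)
    rw [show List.replicate (((m:Nat):Int)+1).toNat (0:Int) = List.replicate (m+1) 0 from by rw [hm1],
      hA, pvBRow_charac]
    apply List.map_congr_left
    intro t ht
    rw [List.mem_range] at ht
    rw [if_pos (by omega)]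
    cases t with
    | zero =>
      rw [if_neg (by omega)]
      rfl
    | succ t =>
      rw [if_pos (by omega)]
      rw [pvTgt_equiv _ _ hp0, pvTgt_pref]

-- A's rows and B's rows coincide, row by row
lemma pvRows_eq (plant : List (List Int)) (col : Int) (k : Nat) :
    pvFinals (pvFA plant) col (fun _ => List.replicate (col+1).toNat 0) k
    = pvBRowsN plant col k := by
  induction k with
  | zero => rfl
  | succ k ih =>
    show pvInner (pvFA plant) col ((k:Int)+1) _ (List.replicate (col+1).toNat 0) = _
    rw [ih, pvRow_eq plant col ((k:Int)+1) _ (pvBRowsN_head plant col k)]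
    rfl

-- ---- main equality ----

lemma pv_main (plant : List (List Int)) (lin col : Int) :
    calculoDeImg plant lin col = calculoDeImg_alt plant lin col := by
  rcases lt_or_ge lin 0 with hl | hl
  · have h1 : PySem.List.pyRange 1 (lin+1) 1 = [] :=
      PySem.List.pyRange_one_eq_nil (by omega)
    have h0 : PySem.List.pyRange 0 (lin+1) 1 = [] :=
      PySem.List.pyRange_one_eq_nil (by omega)
    unfold calculoDeImg calculoDeImg_alt
    rw [h1, h0]
    simp
  · obtain ⟨n, rfl⟩ : ∃ n : Nat, lin = (n:Int) := ⟨lin.toNat, by omega⟩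
    have hA : calculoDeImg plant (n:Int) col
        = pvOuter (pvFA plant) col ((n:Int)+1)
            ((PySem.List.pyRange 0 ((n:Int)+1) 1).map
              (fun _ => List.replicate (col+1).toNat (0:Int))) := rfl
    have hinit : (PySem.List.pyRange 0 ((n:Int)+1) 1).map
        (fun _ => List.replicate (col+1).toNat (0:Int))
        = (List.range (n+1)).map (fun _ => List.replicate (col+1).toNat (0:Int)) := by
      rw [List.map_const', List.map_const', PySem.List.length_pyRange_one, List.length_range]
      norm_num
    rw [hA, hinit, pvOuter_charac _ _ _ (n+1) n (by omega)]
    have hB : calculoDeImg_alt plant (n:Int) col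
        = ((PySem.List.pyRange 0 ((n:Int)+1) 1).foldl (pvBStep plant col) ([], [])).2 := rfl
    rw [hB, pvBOuter_charac]
    apply List.map_congr_left
    intro k hk
    rw [List.mem_range] at hk
    rw [if_pos (by omega)]
    exact pvRows_eq plant col k

-- ===== VERDICT (by name: the statement is the Claim_ definition above) =====
theorem calculoDeImg_spec : Claim_equal_calculoDeImg := by
  intro plant lin col _hdom _hpre
  exact pv_main plant lin col
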